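-- pv_equiv track=rewrite | github.com/valory-xyz/IEKit | packages/valory/skills/decision_making_abci/tasks/staking.py | group_tweets
-- ===== SOURCE A (Python) =====
-- from typing import Dict, Generator, List, Optional, Tuple, cast
--
-- POINTS_PER_ACTIVITY_UPDATE = 200
--
-- def group_tweets(
--     tweet_id_to_points: Dict, pending_points: int
-- ) -> Tuple[int, List[str]]:
--     """Group tweets for the next update"""
--
--     # Add the pending points as another tweet
--     tweet_id_to_points["dummy_id"] = pending_points
--
--     selected_tweets = []
--     update_points = 0
--
--     # Sort the tweet dict, from more points to lest points
--     sorted_tweet_id_to_points = dict(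
--         sorted(tweet_id_to_points.items(), key=lambda item: item[1], reverse=True)
--     )
--
--     while True:
--         # Stop when adding the remaining points does not produce a new update
--         selected_points = sum(
--             v for k, v in tweet_id_to_points.items() if k in selected_tweets
--         )
--         remainder_points = selected_points % POINTS_PER_ACTIVITY_UPDATE
--         remaining_points = sum(list(sorted_tweet_id_to_points.values()))
--         if remainder_points + remaining_points < POINTS_PER_ACTIVITY_UPDATE:
--             break
--
--         # Add the next tweet
--         tweet_id = list(sorted_tweet_id_to_points.keys())[0]
--         update_points += sorted_tweet_id_to_points[tweet_id]
--         if tweet_id != "dummy_id":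
--             selected_tweets.append(tweet_id)
--
--         # Remove from the dict
--         del sorted_tweet_id_to_points[tweet_id]
--
--     # Calculate update
--     updates = int(update_points / POINTS_PER_ACTIVITY_UPDATE)
--
--     return updates, selected_tweets
-- ===== SOURCE B (Python) =====
-- POINTS_PER_ACTIVITY_UPDATE = 200
--
-- def group_tweets(tweet_id_to_points, pending_points):
--     """Group tweets for the next update (single pass over the sorted items)."""
--     # Same observable mutation as the original: register the pending points
--     tweet_id_to_points["dummy_id"] = pending_points
--
--     order = sorted(tweet_id_to_points.items(), key=lambda item: item[1], reverse=True)
--     remaining_points = sum(points for _, points in order)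
--
--     selected_tweets = []
--     selected_points = 0
--     update_points = 0
--     for tweet_id, points in order:
--         if selected_points % POINTS_PER_ACTIVITY_UPDATE + remaining_points < POINTS_PER_ACTIVITY_UPDATE:
--             break
--         update_points += points
--         remaining_points -= points
--         if tweet_id != "dummy_id":
--             selected_tweets.append(tweet_id)
--             selected_points += points
--
--     return int(update_points / POINTS_PER_ACTIVITY_UPDATE), selected_tweets
-- ===== Notes on version B (the rewrite author's own statement) =====
-- stated objective: faster
-- what changed: A's while-loop re-sums the selected points and the remaining points from scratch and rebuilds key lists on every iteration (O(n^2)); B sorts once and does a single pass over the sorted items maintaining running sums for selected, remaining and update points (O(n log n)).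
import Mathlib
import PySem

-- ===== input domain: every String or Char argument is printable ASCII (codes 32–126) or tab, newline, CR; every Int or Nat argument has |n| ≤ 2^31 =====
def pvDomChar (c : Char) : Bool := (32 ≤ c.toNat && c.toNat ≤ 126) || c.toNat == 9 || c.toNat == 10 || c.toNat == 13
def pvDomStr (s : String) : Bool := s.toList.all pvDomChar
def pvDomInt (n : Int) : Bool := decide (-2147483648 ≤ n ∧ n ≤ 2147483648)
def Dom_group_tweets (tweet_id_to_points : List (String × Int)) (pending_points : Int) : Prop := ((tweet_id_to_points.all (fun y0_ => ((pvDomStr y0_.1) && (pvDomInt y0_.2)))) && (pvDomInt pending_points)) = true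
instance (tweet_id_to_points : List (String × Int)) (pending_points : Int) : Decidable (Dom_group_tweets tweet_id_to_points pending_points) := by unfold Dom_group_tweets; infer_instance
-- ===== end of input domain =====

-- B replaces A's quadratic while-loop (which re-sums the selected and remaining points from
-- scratch each iteration and deletes from the sorted dict) by one pass over the sorted items
-- with incrementally maintained running sums.  Both A and B mutate the argument dict in Python
-- (they add the "dummy_id" entry); the equivalence proved here is about the return value.

-- ===== PORT A =====
-- while-loop of A: state = (remaining sorted items, selected_tweets, update_points);
-- the [] case is Python's final iteration, where remaining = 0 and remainder < 200 force the break.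
def pvALoop (d : PySem.Dict String Int) : List (String × Int) → List String → Int → Int × List String
  | [], sel, u => (Int.tdiv u 200, sel)
  | (k, v) :: rest, sel, u =>
    let selected_points := ((d.items.filter (fun q => sel.contains q.1)).map Prod.snd).sum
    let remainder_points := PySem.Int.mod selected_points 200
    let remaining_points := (((k, v) :: rest).map Prod.snd).sum
    if remainder_points + remaining_points < 200 then (Int.tdiv u 200, sel)
    else pvALoop d rest (if k ≠ "dummy_id" then sel ++ [k] else sel) (u + v)

def group_tweets (tweet_id_to_points : List (String × Int)) (pending_points : Int) : Int × List String :=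
  let d := (PySem.Dict.mk tweet_id_to_points).insert "dummy_id" pending_points
  let sorted_items := PySem.List.sorted d.items (fun item => item.2) true
  pvALoop d sorted_items [] 0
  -- Int.tdiv u 200 is Python's int(update_points / 200): truncation toward zero

-- ===== PORT B =====
-- single pass of B: state = (remaining items, remaining_points, selected_tweets, selected_points, update_points)
def pvBLoop : List (String × Int) → Int → List String → Int → Int → Int × List String
  | [], _, sel, _, u => (Int.tdiv u 200, sel)
  | (k, v) :: rest, remaining, sel, selp, u =>
    if PySem.Int.mod selp 200 + remaining < 200 then (Int.tdiv u 200, sel)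
    else if k ≠ "dummy_id" then pvBLoop rest (remaining - v) (sel ++ [k]) (selp + v) (u + v)
    else pvBLoop rest (remaining - v) sel selp (u + v)

def group_tweets_alt (tweet_id_to_points : List (String × Int)) (pending_points : Int) : Int × List String :=
  let d := (PySem.Dict.mk tweet_id_to_points).insert "dummy_id" pending_points
  let order := PySem.List.sorted d.items (fun item => item.2) true
  pvBLoop order ((order.map Prod.snd).sum) [] 0 0

-- ===== PRECONDITION & SPEC =====
-- The Python argument is a dict, whose keys are necessarily unique; an association list with a
-- duplicated key does not represent any dict, so such lists are outside the claim.
def Pre_group_tweets (tweet_id_to_points : List (String × Int)) (pending_points : Int) : Prop :=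
  (tweet_id_to_points.map Prod.fst).Nodup
instance (tweet_id_to_points : List (String × Int)) (pending_points : Int) : Decidable (Pre_group_tweets tweet_id_to_points pending_points) := by unfold Pre_group_tweets; infer_instance

def pvWitness_group_tweets : (List (String × Int)) × Int := ([("a", 300), ("b", 50)], 120)

def Spec_group_tweets (tweet_id_to_points : List (String × Int)) (pending_points : Int) (out : Int × List String) : Prop := out = group_tweets_alt tweet_id_to_points pending_points
instance (tweet_id_to_points : List (String × Int)) (pending_points : Int) (out : Int × List String) : Decidable (Spec_group_tweets tweet_id_to_points pending_points out) := by unfold Spec_group_tweets; infer_instance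

-- ===== CLAIM (what is proved, stated in full; the proofs are below) =====
def Claim_equal_group_tweets : Prop := ∀ (tweet_id_to_points : List (String × Int)) (pending_points : Int), Dom_group_tweets tweet_id_to_points pending_points → Pre_group_tweets tweet_id_to_points pending_points → Spec_group_tweets tweet_id_to_points pending_points (group_tweets tweet_id_to_points pending_points)

-- ===== LEMMAS AND PROOFS =====


lemma pv_filter_key_eq {l : List (String × Int)} {k : String} {v : Int}
    (hnd : (l.map Prod.fst).Nodup) (hm : (k, v) ∈ l) :
    l.filter (fun q => q.1 == k) = [(k, v)] := by
  induction l with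
  | nil => simp at hm
  | cons a t ih =>
    obtain ⟨ak, av⟩ := a
    simp only [List.map_cons, List.nodup_cons] at hnd
    obtain ⟨ha, hnd'⟩ := hnd
    rcases List.mem_cons.mp hm with h | h
    · have h1 : k = ak ∧ v = av := by simpa using h
      obtain ⟨rfl, rfl⟩ := h1
      have hnone : t.filter (fun q => q.1 == k) = [] := by
        refine List.filter_eq_nil_iff.mpr ?_
        intro q hq
        simp only [beq_eq_false_iff_ne, ne_eq, Bool.not_eq_true, beq_eq_false_iff_ne]
        intro hqk
        exact ha (hqk ▸ List.mem_map_of_mem hq)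
      simp [hnone]
    · have hk2 : k ∈ t.map Prod.fst := by
        exact List.mem_map_of_mem h
      have hak : (ak == k) = false := by
        simp only [beq_eq_false_iff_ne]
        rintro rfl
        exact ha hk2
      simp [hak, ih hnd' h]

lemma pv_sum_filter_append {l : List (String × Int)} {sel : List String} {k : String}
    (hk : k ∉ sel) :
    ((l.filter (fun q => (sel ++ [k]).contains q.1)).map Prod.snd).sum
      = ((l.filter (fun q => sel.contains q.1)).map Prod.snd).sum
        + ((l.filter (fun q => q.1 == k)).map Prod.snd).sum := by
  induction l with
  | nil => simp
  | cons q t ih =>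
    by_cases h1 : q.1 ∈ sel
    · have hc1 : sel.contains q.1 = true := by simpa using h1
      have hc2 : (sel ++ [k]).contains q.1 = true := by simp [h1]
      have hk2 : (q.1 == k) = false := by
        simp only [beq_eq_false_iff_ne]; rintro rfl; exact hk h1
      simp only [List.filter_cons, hc1, hc2, hk2, if_true, if_false, Bool.false_eq_true,
        List.map_cons, List.sum_cons, ih]
      ring
    · have hc1 : sel.contains q.1 = false := by simpa using h1
      by_cases h2 : q.1 = k
      · have hc2 : (sel ++ [k]).contains q.1 = true := by simp [h2]
        have hk2 : (q.1 == k) = true := by simpa using h2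
        simp only [List.filter_cons, hc1, hc2, hk2, if_true, Bool.false_eq_true, if_false,
          List.map_cons, List.sum_cons, ih]
        ring
      · have hc2 : (sel ++ [k]).contains q.1 = false := by simp [h1, h2]
        have hk2 : (q.1 == k) = false := by simpa using h2
        simp only [List.filter_cons, hc1, hc2, hk2, Bool.false_eq_true, if_false, ih]

lemma pv_loop_eq (d : PySem.Dict String Int) (hnd : d.items.map Prod.fst |>.Nodup) :
    ∀ (s : List (String × Int)) (sel : List String) (selp u : Int),
      (∀ p ∈ s, p ∈ d.items) →
      (s.map Prod.fst).Nodup →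
      (∀ p ∈ s, p.1 ∉ sel) →
      ((d.items.filter (fun q => sel.contains q.1)).map Prod.snd).sum = selp →
      pvALoop d s sel u = pvBLoop s ((s.map Prod.snd).sum) sel selp u := by
  intro s
  induction s with
  | nil => intro sel selp u _ _ _ _; rfl
  | cons p rest ih =>
    obtain ⟨k, v⟩ := p
    intro sel selp u hsub hsnd hdisj hsel
    have hrem : (((k, v) :: rest).map Prod.snd).sum - v = (rest.map Prod.snd).sum := by
      simp only [List.map_cons, List.sum_cons]; ring
    simp only [pvALoop, pvBLoop, hsel]
    by_cases hc : PySem.Int.mod selp 200 + (((k, v) :: rest).map Prod.snd).sum < 200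
    · rw [if_pos hc, if_pos hc]
    · rw [if_neg hc, if_neg hc]
      have hsub' : ∀ p ∈ rest, p ∈ d.items := fun p hp => hsub p (List.mem_cons_of_mem _ hp)
      have hsnd' : (rest.map Prod.fst).Nodup := by
        simp only [List.map_cons, List.nodup_cons] at hsnd; exact hsnd.2
      have hknr : k ∉ rest.map Prod.fst := by
        simp only [List.map_cons, List.nodup_cons] at hsnd; exact hsnd.1
      by_cases hdk : k = "dummy_id"
      · subst hdk
        have hdisj' : ∀ p ∈ rest, p.1 ∉ sel := fun p hp => hdisj p (List.mem_cons_of_mem _ hp)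
        simp only [ne_eq, not_true_eq_false, if_false, hrem]
        exact ih sel selp (u + v) hsub' hsnd' hdisj' hsel
      · have hks : k ∉ sel := hdisj (k, v) List.mem_cons_self
        have hmem : (k, v) ∈ d.items := hsub (k, v) List.mem_cons_self
        have hsel' : ((d.items.filter (fun q => (sel ++ [k]).contains q.1)).map Prod.snd).sum
            = selp + v := by
          rw [pv_sum_filter_append hks, hsel, pv_filter_key_eq hnd hmem]
          simp
        have hdisj' : ∀ p ∈ rest, p.1 ∉ sel ++ [k] := by
          intro p hp
          simp only [List.mem_append, List.mem_singleton, not_or]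
          refine ⟨hdisj p (List.mem_cons_of_mem _ hp), ?_⟩
          rintro rfl
          exact hknr (List.mem_map_of_mem hp)
        simp only [hdk, ne_eq, not_false_eq_true, if_true, hrem]
        exact ih (sel ++ [k]) (selp + v) (u + v) hsub' hsnd' hdisj' hsel'

-- ===== VERDICT (by name: the statement is the Claim_ definition above) =====
theorem group_tweets_spec : Claim_equal_group_tweets := by
  intro t p _ hpre
  unfold Spec_group_tweets group_tweets group_tweets_alt
  have hnd : ((PySem.Dict.mk t).insert "dummy_id" p).items.map Prod.fst |>.Nodup := by
    have := PySem.Dict.nodup_keys_insert (d := PySem.Dict.mk t) (k := "dummy_id") (v := p)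
      (by simpa [PySem.Dict.keys] using hpre)
    simpa [PySem.Dict.keys] using this
  set d := (PySem.Dict.mk t).insert "dummy_id" p with hd
  have hperm : (PySem.List.sorted d.items (fun item => item.2) true).Perm d.items :=
    PySem.List.sorted_perm ..
  have hsub : ∀ q ∈ PySem.List.sorted d.items (fun item => item.2) true, q ∈ d.items :=
    fun q hq => hperm.mem_iff.mp hq
  have hsnd : ((PySem.List.sorted d.items (fun item => item.2) true).map Prod.fst).Nodup :=
    (hperm.map Prod.fst).nodup_iff.mpr hnd
  have hdisj : ∀ q ∈ PySem.List.sorted d.items (fun item => item.2) true,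
      q.1 ∉ ([] : List String) := fun q _ => List.not_mem_nil
  have hsel : ((d.items.filter (fun q => ([] : List String).contains q.1)).map Prod.snd).sum
      = (0 : Int) := by simp
  exact pv_loop_eq d hnd _ [] 0 0 hsub hsnd hdisj hsel
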